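-- pv_equiv track=rewrite | github.com/nbratek/WDI | zestaw 7/zad16.py | piatki
-- ===== SOURCE A (Python) =====
-- def piatki(n):
--     l_piatek = 0
--     while n > 0:
--         if n % 8 == 5:
--             l_piatek += 1
--             n //= 8
--         else:
--             n //= 8
--     if l_piatek % 2 == 0:
--         return True
--     return False
-- ===== SOURCE B (Python) =====
-- def piatki(n):
--     # Recursive parity: True (even) for n <= 0, otherwise flip the parity of the
--     # rest of the digits whenever the lowest octal digit is 5. No counter kept.
--     if n <= 0:
--         return True
--     return piatki(n // 8) ^ (n % 8 == 5)
-- ===== Notes on version B (the rewrite author's own statement) =====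
-- stated objective: simpler
-- what changed: B replaces A's iterative loop that accumulates an integer counter and tests it mod 2 at the end by a direct structural recursion on the octal digits that carries no counter at all: it XORs a boolean parity flag with (n % 8 == 5) at each level.
import Mathlib
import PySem

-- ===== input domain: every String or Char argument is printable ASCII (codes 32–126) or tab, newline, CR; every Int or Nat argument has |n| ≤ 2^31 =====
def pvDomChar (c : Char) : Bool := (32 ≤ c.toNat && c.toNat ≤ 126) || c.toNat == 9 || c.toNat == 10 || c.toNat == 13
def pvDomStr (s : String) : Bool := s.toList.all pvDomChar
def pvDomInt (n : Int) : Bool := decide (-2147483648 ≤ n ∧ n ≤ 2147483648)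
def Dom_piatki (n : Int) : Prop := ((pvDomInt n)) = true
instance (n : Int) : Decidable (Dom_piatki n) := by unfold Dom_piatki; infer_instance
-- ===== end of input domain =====

-- B replaces A's counter-accumulating loop by a counterless structural recursion XOR-ing a parity flag (objective: simpler).

-- ===== PORT A =====
-- the while loop of A, carrying the counter l_piatek
def piatkiLoop (n : Int) (l : Nat) : Nat :=
  if h : n > 0 then
    if PySem.Int.mod n 8 = 5 then
      piatkiLoop (PySem.Int.floordiv n 8) (l + 1)
    else
      piatkiLoop (PySem.Int.floordiv n 8) l
  else l
termination_by n.toNat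
decreasing_by
  all_goals
    rw [PySem.Int.floordiv_eq_ediv_of_pos (by omega : (0:Int) < 8)]
    omega

def piatki (n : Int) : Bool :=
  let l_piatek := piatkiLoop n 0
  if l_piatek % 2 = 0 then true else false

-- ===== PORT B =====
def piatki_alt (n : Int) : Bool :=
  if _h : n ≤ 0 then true
  else xor (piatki_alt (PySem.Int.floordiv n 8)) (PySem.Int.mod n 8 == 5)
termination_by n.toNat
decreasing_by
  rw [PySem.Int.floordiv_eq_ediv_of_pos (by omega : (0:Int) < 8)]
  omega

-- ===== PRECONDITION & SPEC =====
def Spec_piatki (n : Int) (out : Bool) : Prop := out = piatki_alt n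
instance (n : Int) (out : Bool) : Decidable (Spec_piatki n out) := by unfold Spec_piatki; infer_instance

-- ===== CLAIM (what is proved, stated in full; the proofs are below) =====
def Claim_equal_piatki : Prop := ∀ (n : Int), Dom_piatki n → Spec_piatki n (piatki n)

-- ===== LEMMAS AND PROOFS =====

-- ===== VERDICT (by name: the statement is the Claim_ definition above) =====
-- helper unfold lemmas for the loop
lemma piatkiLoop_pos (n : Int) (l : Nat) (h : n > 0) :
    piatkiLoop n l =
      if PySem.Int.mod n 8 = 5 then piatkiLoop (PySem.Int.floordiv n 8) (l + 1)
      else piatkiLoop (PySem.Int.floordiv n 8) l := by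
  rw [piatkiLoop]; simp [h]

lemma piatkiLoop_nonpos (n : Int) (l : Nat) (h : ¬ n > 0) : piatkiLoop n l = l := by
  rw [piatkiLoop]; simp [h]

-- the loop's counter is additive in its initial value
lemma piatkiLoop_add (n : Int) (l : Nat) : piatkiLoop n l = l + piatkiLoop n 0 := by
  induction hm : n.toNat using Nat.strong_induction_on generalizing n l with
  | _ m ih =>
    by_cases h : n > 0
    · have hfd : PySem.Int.floordiv n 8 = n / 8 :=
        PySem.Int.floordiv_eq_ediv_of_pos (by omega)
      have hlt : (n / 8).toNat < m := by omega
      rw [piatkiLoop_pos n l h, piatkiLoop_pos n 0 h, hfd]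
      by_cases h5 : PySem.Int.mod n 8 = 5
      · rw [if_pos h5, if_pos h5,
          ih ((n / 8).toNat) hlt (n / 8) (l + 1) rfl,
          ih ((n / 8).toNat) hlt (n / 8) (0 + 1) rfl]
        omega
      · rw [if_neg h5, if_neg h5, ih ((n / 8).toNat) hlt (n / 8) l rfl]
    · rw [piatkiLoop_nonpos n l h, piatkiLoop_nonpos n 0 h]; omega

-- B's recursion computes exactly the parity of A's counter
lemma piatki_alt_eq_parity (n : Int) :
    piatki_alt n = decide (piatkiLoop n 0 % 2 = 0) := by
  induction hm : n.toNat using Nat.strong_induction_on generalizing n with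
  | _ m ih =>
    by_cases h : n ≤ 0
    · rw [piatki_alt, piatkiLoop_nonpos n 0 (by omega)]
      simp [h]
    · have hpos : n > 0 := by omega
      have hfd : PySem.Int.floordiv n 8 = n / 8 :=
        PySem.Int.floordiv_eq_ediv_of_pos (by omega)
      have hlt : (n / 8).toNat < m := by omega
      rw [piatki_alt, piatkiLoop_pos n 0 hpos, hfd]
      simp only [h, dite_false]
      rw [ih ((n / 8).toNat) hlt (n / 8) rfl]
      by_cases h5 : PySem.Int.mod n 8 = 5
      · rw [if_pos h5, piatkiLoop_add (n / 8) (0 + 1), h5]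
        by_cases hL : piatkiLoop (n / 8) 0 % 2 = 0 <;>
          simp [hL] <;> omega
      · rw [if_neg h5]
        have hmd : PySem.Int.mod n 8 = n % 8 :=
          PySem.Int.mod_eq_emod_of_pos (by omega)
        rw [hmd] at h5
        have hb : (n % 8 == 5) = false := beq_eq_false_iff_ne.mpr h5
        simp [hb]

theorem piatki_spec : Claim_equal_piatki := by
  intro n _
  unfold Spec_piatki piatki
  rw [piatki_alt_eq_parity]
  by_cases hL : piatkiLoop n 0 % 2 = 0 <;> simp [hL]
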